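-- pv_equiv track=rewrite | github.com/tielarose/factswise-app | backend/problem_set_questions_creator.py | create_add_sub_problem_set_questions
-- ===== SOURCE A (Python) =====
-- def create_add_sub_problem_set_questions(list_of_part_part_wholes):
--     """Given a list of part-part-whole tuples, return a list of tuples with all possible addition and subtraction equations
--
--     Input should be: [(part, part, whole), (part, part, whole)]
--     Example input: [(1,4,5)]
--
--     Output should be: [(string_question, answer_as_int), (string_question, answer_as_int)]
--     Example output: [('1 + 4', 5), ('4 + 1', 5), ('5 - 4', 1), ('5 - 1', 4)]"""
--
--     problem_set_questions = []
--
--     for part1, part2, whole in list_of_part_part_wholes: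
--         if part1 != part2:
--             problem_set_questions.append((f"{part1} + {part2}", whole))
--             problem_set_questions.append((f"{part2} + {part1}", whole))
--             problem_set_questions.append((f"{whole} - {part1}", part2))
--             problem_set_questions.append((f"{whole} - {part2}", part1))
--         else:
--             problem_set_questions.append((f"{part1} + {part2}", whole))
--             problem_set_questions.append((f"{whole} - {part1}", part2))
--
--     return problem_set_questions
-- ===== SOURCE B (Python) =====
-- def create_add_sub_problem_set_questions(list_of_part_part_wholes):
--     """Branch-free variant: enumerate the four candidate equations as numeric
--     (left, op, right, answer) tuples and keep each one only if it has not
--     already appeared for THIS part-part-whole tuple; the part1 == part2 case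
--     collapses automatically because the commuted sum and the second
--     difference become duplicate tuples."""
--     problem_set_questions = []
--     for part1, part2, whole in list_of_part_part_wholes:
--         seen = []
--         for candidate in [(part1, "+", part2, whole),
--                           (part2, "+", part1, whole),
--                           (whole, "-", part1, part2),
--                           (whole, "-", part2, part1)]:
--             if candidate not in seen:
--                 seen.append(candidate)
--                 left, op, right, answer = candidate
--                 problem_set_questions.append((f"{left} {op} {right}", answer))
--     return problem_set_questions
-- ===== Notes on version B (the rewrite author's own statement) =====
-- stated objective: simpler
-- what changed: Replaces A's explicit part1!=part2 two-branch duplication of append blocks by a single uniform list of four (left, op, right, answer) candidate tuples with a per-tuple seen-list dedup, so the equal-parts case collapses automatically.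
import Mathlib
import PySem

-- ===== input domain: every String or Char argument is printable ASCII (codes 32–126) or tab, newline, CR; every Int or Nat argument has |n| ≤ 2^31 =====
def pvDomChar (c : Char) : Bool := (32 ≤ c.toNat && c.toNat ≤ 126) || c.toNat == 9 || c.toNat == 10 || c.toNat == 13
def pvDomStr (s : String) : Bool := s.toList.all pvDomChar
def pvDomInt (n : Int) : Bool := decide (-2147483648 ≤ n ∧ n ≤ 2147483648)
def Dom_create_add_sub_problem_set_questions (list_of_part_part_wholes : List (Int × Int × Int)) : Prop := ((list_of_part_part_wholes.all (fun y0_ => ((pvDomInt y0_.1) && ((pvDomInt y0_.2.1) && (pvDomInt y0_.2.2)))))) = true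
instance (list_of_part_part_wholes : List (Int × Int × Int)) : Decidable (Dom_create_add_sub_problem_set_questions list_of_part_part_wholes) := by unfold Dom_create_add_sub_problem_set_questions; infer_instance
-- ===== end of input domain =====

-- B replaces A's part1≠part2 branch by a uniform four-candidate list with a per-tuple
-- dedup on numeric (left, op, right, answer) tuples (objective: simpler).


-- ===== PORT A =====
-- f"{x} {op} {y}" for ints x, y and an operator character; used by both ports' f-strings
def pvFmt (x : Int) (op : Char) (y : Int) : String :=
  String.ofList (PySem.Int.toChars x ++ [' ', op, ' '] ++ PySem.Int.toChars y)

def create_add_sub_problem_set_questions (list_of_part_part_wholes : List (Int × Int × Int)) : List (String × Int) :=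
  list_of_part_part_wholes.foldl (fun problem_set_questions t =>
    let part1 := t.1
    let part2 := t.2.1
    let whole := t.2.2
    if part1 ≠ part2 then
      problem_set_questions
        ++ [(pvFmt part1 '+' part2, whole)]
        ++ [(pvFmt part2 '+' part1, whole)]
        ++ [(pvFmt whole '-' part1, part2)]
        ++ [(pvFmt whole '-' part2, part1)]
    else
      problem_set_questions
        ++ [(pvFmt part1 '+' part2, whole)]
        ++ [(pvFmt whole '-' part1, part2)]) []

-- ===== PORT B =====
def create_add_sub_problem_set_questions_alt (list_of_part_part_wholes : List (Int × Int × Int)) : List (String × Int) :=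
  list_of_part_part_wholes.foldl (fun problem_set_questions t =>
    let part1 := t.1
    let part2 := t.2.1
    let whole := t.2.2
    let candidates : List (Int × Char × Int × Int) :=
      [(part1, '+', part2, whole), (part2, '+', part1, whole),
       (whole, '-', part1, part2), (whole, '-', part2, part1)]
    (candidates.foldl (fun st c =>
        if c ∈ st.1 then st
        else (st.1 ++ [c], st.2 ++ [(pvFmt c.1 c.2.1 c.2.2.1, c.2.2.2)]))
      (([] : List (Int × Char × Int × Int)), problem_set_questions)).2) []

-- ===== PRECONDITION & SPEC =====
def Spec_create_add_sub_problem_set_questions (list_of_part_part_wholes : List (Int × Int × Int)) (out : List (String × Int)) : Prop := out = create_add_sub_problem_set_questions_alt list_of_part_part_wholes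
instance (list_of_part_part_wholes : List (Int × Int × Int)) (out : List (String × Int)) : Decidable (Spec_create_add_sub_problem_set_questions list_of_part_part_wholes out) := by unfold Spec_create_add_sub_problem_set_questions; infer_instance

-- ===== CLAIM (what is proved, stated in full; the proofs are below) =====
def Claim_equal_create_add_sub_problem_set_questions : Prop := ∀ (list_of_part_part_wholes : List (Int × Int × Int)), Dom_create_add_sub_problem_set_questions list_of_part_part_wholes → Spec_create_add_sub_problem_set_questions list_of_part_part_wholes (create_add_sub_problem_set_questions list_of_part_part_wholes)

-- ===== LEMMAS AND PROOFS =====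

-- One step of B's inner dedup loop produces exactly A's branch output.
theorem pv_step (acc : List (String × Int)) (p1 p2 w : Int) :
    (([(p1, '+', p2, w), (p2, '+', p1, w),
       (w, '-', p1, p2), (w, '-', p2, p1)] : List (Int × Char × Int × Int)).foldl
      (fun st c =>
        if c ∈ st.1 then st
        else (st.1 ++ [c], st.2 ++ [(pvFmt c.1 c.2.1 c.2.2.1, c.2.2.2)]))
      (([] : List (Int × Char × Int × Int)), acc)).2
    = if p1 ≠ p2 then
        acc ++ [(pvFmt p1 '+' p2, w)] ++ [(pvFmt p2 '+' p1, w)]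
            ++ [(pvFmt w '-' p1, p2)] ++ [(pvFmt w '-' p2, p1)]
      else
        acc ++ [(pvFmt p1 '+' p2, w)] ++ [(pvFmt w '-' p1, p2)] := by
  by_cases h : p1 = p2
  · subst h
    simp [List.foldl]
  · simp [List.foldl, Prod.ext_iff, h, Ne.symm h]

-- ===== VERDICT (by name: the statement is the Claim_ definition above) =====
theorem create_add_sub_problem_set_questions_spec : Claim_equal_create_add_sub_problem_set_questions := by
  intro l _
  unfold Spec_create_add_sub_problem_set_questions create_add_sub_problem_set_questions create_add_sub_problem_set_questions_alt
  refine List.foldl_ext _ _ _ (fun acc t _ => ?_)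
  exact (pv_step acc t.1 t.2.1 t.2.2).symm
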